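-- pv_equiv track=rewrite | github.com/VianHks/Sarvian-Test | algoritma/tes-algoritma-sarvian.py | count_frequent_words
-- ===== SOURCE A (Python) =====
-- def count_frequent_words(INPUT, QUERY):
--     word_counts = {}
--     for word in INPUT:
--         word_counts[word] = word_counts.get(word, 0) + 1
--
--     query_counts = []
--     for word in QUERY:
--         count = word_counts.get(word, 0)
--         query_counts.append((word, count))
--
--     return query_counts
-- ===== SOURCE B (Python) =====
-- def count_frequent_words(INPUT, QUERY):
--     # Stream INPUT once, incrementally updating the (word, count) answer list:
--     # no frequency table and no lookup phase.
--     result = [(w, 0) for w in QUERY]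
--     for word in INPUT:
--         result = [(w, c + 1) if w == word else (w, c) for (w, c) in result]
--     return result
-- ===== Notes on version B (the rewrite author's own statement) =====
-- stated objective: alternative
-- what changed: Inverts the structure: instead of building a frequency dict over INPUT and then looking up each query, B initialises the answer list [(w,0) for w in QUERY] and streams INPUT once, rebuilding the answer list with matching entries incremented, so the result itself is the only state maintained.
import Mathlib
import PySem

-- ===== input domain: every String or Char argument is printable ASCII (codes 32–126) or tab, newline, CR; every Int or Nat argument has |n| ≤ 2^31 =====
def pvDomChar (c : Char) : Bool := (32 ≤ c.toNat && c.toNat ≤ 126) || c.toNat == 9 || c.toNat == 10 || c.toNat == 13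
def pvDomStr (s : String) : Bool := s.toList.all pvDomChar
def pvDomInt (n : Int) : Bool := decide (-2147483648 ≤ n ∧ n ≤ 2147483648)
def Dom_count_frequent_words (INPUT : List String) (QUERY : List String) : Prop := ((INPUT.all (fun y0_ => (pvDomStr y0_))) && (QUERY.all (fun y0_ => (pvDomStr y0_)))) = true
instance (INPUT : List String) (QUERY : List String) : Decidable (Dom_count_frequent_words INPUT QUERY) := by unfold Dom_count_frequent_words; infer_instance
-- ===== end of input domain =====

-- B drops the frequency dict: it streams INPUT once, incrementally updating the (word, count)
-- answer list initialised from QUERY (alternative structure, not faster).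

-- ===== PORT A =====
def count_frequent_words (INPUT : List String) (QUERY : List String) : List (String × Int) :=
  let word_counts : PySem.Dict String Int :=
    INPUT.foldl (fun d word => d.insert word (d.getD word 0 + 1)) PySem.Dict.empty
  QUERY.foldl (fun query_counts word => query_counts ++ [(word, word_counts.getD word 0)]) []

-- ===== PORT B =====
def count_frequent_words_alt (INPUT : List String) (QUERY : List String) : List (String × Int) :=
  INPUT.foldl
    (fun result word => result.map (fun p => if p.1 == word then (p.1, p.2 + 1) else (p.1, p.2)))
    (QUERY.map (fun w => (w, (0 : Int))))

-- ===== PRECONDITION & SPEC =====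
def Spec_count_frequent_words (INPUT : List String) (QUERY : List String) (out : List (String × Int)) : Prop := out = count_frequent_words_alt INPUT QUERY
instance (INPUT : List String) (QUERY : List String) (out : List (String × Int)) : Decidable (Spec_count_frequent_words INPUT QUERY out) := by unfold Spec_count_frequent_words; infer_instance

-- ===== CLAIM (what is proved, stated in full; the proofs are below) =====
def Claim_equal_count_frequent_words : Prop := ∀ (INPUT : List String) (QUERY : List String), Dom_count_frequent_words INPUT QUERY → Spec_count_frequent_words INPUT QUERY (count_frequent_words INPUT QUERY)

-- ===== LEMMAS AND PROOFS =====

-- B's streaming loop: folding INPUT over any answer list adds each element's count to its entry.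
theorem alt_foldl_eq (INPUT : List String) (res : List (String × Int)) :
    INPUT.foldl
      (fun result word => result.map (fun p => if p.1 == word then (p.1, p.2 + 1) else (p.1, p.2)))
      res
    = res.map (fun p => (p.1, p.2 + (INPUT.count p.1 : Int))) := by
  induction INPUT generalizing res with
  | nil => simp
  | cons x xs ih =>
      rw [List.foldl_cons, ih, List.map_map]
      refine List.map_congr_left (fun p _ => ?_)
      simp only [Function.comp_apply, List.count_cons]
      by_cases h : p.1 = x
      · simp [h, eq_comm]
        ring
      · have h' : ¬ (x == p.1) := by simpa [beq_iff_eq] using fun e => h e.symm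
        simp [h, h']

-- A's append-accumulating query loop equals a map, via the counter characterisation of the dict.
theorem a_foldl_eq (INPUT : List String) (QUERY : List String)
    (acc : List (String × Int)) :
    QUERY.foldl (fun query_counts word =>
        query_counts ++ [(word, (INPUT.foldl (fun d word => d.insert word (d.getD word 0 + 1)) PySem.Dict.empty).getD word 0)]) acc
      = acc ++ QUERY.map (fun word => (word, (INPUT.count word : Int))) := by
  induction QUERY generalizing acc with
  | nil => simp
  | cons w ws ih =>
      rw [List.foldl_cons, ih, List.map_cons,
        PySem.Dict.getD_foldl_insert_add_one]
      simp

-- ===== VERDICT (by name: the statement is the Claim_ definition above) =====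
theorem count_frequent_words_spec : Claim_equal_count_frequent_words := by
  intro INPUT QUERY _
  show _ = _
  rw [count_frequent_words, count_frequent_words_alt, alt_foldl_eq, List.map_map]
  simp only [Function.comp_def, zero_add]
  simpa using a_foldl_eq INPUT QUERY []
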